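-- pv_equiv track=rewrite | github.com/Joasro/Capitulo11 | Capitulo11/DobleHash11_4.py | multiplicativeHash
-- ===== SOURCE A (Python) =====
-- def multiplicativeHash(key):
--     # Función de hashing multiplicativa
--     Valorhash = 0
--     byteMask = 0xFF
--     pr1 = 53
--     pr2 = 89
--     while key > 0:
--         byte = key & byteMask
--         Valorhash = Valorhash * pr1 + (byte + pr2)
--         key >>= 8
--     return Valorhash
-- ===== SOURCE B (Python) =====
-- def multiplicativeHash(key):
--     # Build-list-then-power-sum: extract bytes LSB-first, then evaluate the
--     # polynomial with explicit powers instead of a rolling Horner accumulator.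
--     pr1 = 53
--     pr2 = 89
--     bs = []
--     while key > 0:
--         bs.append(key & 0xFF)
--         key >>= 8
--     n = len(bs)
--     return sum((b + pr2) * pr1 ** (n - 1 - i) for i, b in enumerate(bs))
-- ===== Notes on version B (the rewrite author's own statement) =====
-- stated objective: alternative
-- what changed: Replaces the rolling Horner accumulator with a two-phase pass: first collect the key's bytes LSB-first into a list, then return the polynomial as an explicit power sum over enumerate.
import Mathlib
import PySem

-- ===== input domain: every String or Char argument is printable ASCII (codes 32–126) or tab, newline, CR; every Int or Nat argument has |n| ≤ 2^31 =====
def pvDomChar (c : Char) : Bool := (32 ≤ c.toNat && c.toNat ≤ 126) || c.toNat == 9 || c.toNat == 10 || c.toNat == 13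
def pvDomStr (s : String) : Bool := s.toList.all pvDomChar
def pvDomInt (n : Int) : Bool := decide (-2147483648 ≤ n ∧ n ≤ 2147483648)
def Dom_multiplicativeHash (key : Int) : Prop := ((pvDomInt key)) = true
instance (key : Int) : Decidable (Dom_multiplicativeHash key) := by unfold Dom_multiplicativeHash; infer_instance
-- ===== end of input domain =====

-- B replaces A's rolling Horner accumulator with a two-phase pass (collect bytes LSB-first, then an explicit power sum); alternative decomposition, same cost.


theorem pvShiftRight8_toNat_lt (key : Int) (h : 0 < key) : (key >>> 8).toNat < key.toNat := by
  cases key with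
  | ofNat n =>
    show n >>> 8 < n
    have hn : 0 < n := by rw [Int.ofNat_eq_natCast] at h; exact_mod_cast h
    calc n >>> 8 = n / 2 ^ 8 := Nat.shiftRight_eq_div_pow n 8
      _ < n := Nat.div_lt_self hn (by norm_num)
  | negSucc n => exact absurd h (not_lt.mpr (le_of_lt (Int.negSucc_lt_zero n)))

-- ===== PORT A =====
-- the while loop of A: state (key, Valorhash)
def hashLoopA (key acc : Int) : Int :=
  if _h : key > 0 then
    hashLoopA (key >>> 8) (acc * 53 + (PySem.Int.band key 255 + 89))
  else acc
termination_by key.toNat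
decreasing_by exact pvShiftRight8_toNat_lt key _h

def multiplicativeHash (key : Int) : Int := hashLoopA key 0

-- ===== PORT B =====
-- Source B's first loop: collect the bytes of key, least significant first
def bytesOf (key : Int) : List Int :=
  if _h : key > 0 then PySem.Int.band key 255 :: bytesOf (key >>> 8) else []
termination_by key.toNat
decreasing_by exact pvShiftRight8_toNat_lt key _h

-- Source B's second phase: sum((b + 89) * 53 ** (n - 1 - i) for i, b in enumerate(bs))
def multiplicativeHash_alt (key : Int) : Int :=
  let bs := bytesOf key
  let n : Int := bs.length
  ((PySem.List.enumerate bs 0).map (fun ib => (ib.2 + 89) * 53 ^ (n - 1 - ib.1).toNat)).sum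

-- ===== PRECONDITION & SPEC =====
def Spec_multiplicativeHash (key : Int) (out : Int) : Prop := out = multiplicativeHash_alt key
instance (key : Int) (out : Int) : Decidable (Spec_multiplicativeHash key out) := by unfold Spec_multiplicativeHash; infer_instance

-- ===== CLAIM (what is proved, stated in full; the proofs are below) =====
def Claim_equal_multiplicativeHash : Prop := ∀ (key : Int), Dom_multiplicativeHash key → Spec_multiplicativeHash key (multiplicativeHash key)

-- ===== LEMMAS AND PROOFS =====

-- A's loop is Horner's rule over the byte list B extracts
theorem hashLoopA_eq_foldl (key acc : Int) :
    hashLoopA key acc = (bytesOf key).foldl (fun a b => a * 53 + (b + 89)) acc := by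
  induction key, acc using hashLoopA.induct with
  | case1 key acc h ih =>
    rw [hashLoopA, bytesOf, dif_pos h, dif_pos h, List.foldl_cons, ih]
  | case2 key acc h =>
    rw [hashLoopA, bytesOf, dif_neg h, dif_neg h, List.foldl_nil]

-- Horner's rule equals the explicit power sum (generalized over enumerate's start s)
theorem horner_eq_powsum (bs : List Int) (s acc : Int) :
    bs.foldl (fun a b => a * 53 + (b + 89)) acc
      = acc * 53 ^ bs.length
        + ((PySem.List.enumerate bs s).map
            (fun ib => (ib.2 + 89) * 53 ^ (s + (bs.length : Int) - 1 - ib.1).toNat)).sum := by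
  induction bs generalizing s acc with
  | nil => simp [PySem.List.enumerate_nil]
  | cons b bs ih =>
    rw [List.foldl_cons, ih (s + 1) (acc * 53 + (b + 89)),
        PySem.List.enumerate_cons, List.map_cons, List.sum_cons]
    have e1 : (s + ((b :: bs).length : Int) - 1 - s).toNat = bs.length := by
      simp only [List.length_cons]
      push_cast
      omega
    have hfun : (fun ib : Int × Int => (ib.2 + 89) * 53 ^ (s + ((b :: bs).length : Int) - 1 - ib.1).toNat)
        = (fun ib : Int × Int => (ib.2 + 89) * 53 ^ (s + 1 + (bs.length : Int) - 1 - ib.1).toNat) := by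
      funext ib
      have : s + ((b :: bs).length : Int) - 1 - ib.1 = s + 1 + (bs.length : Int) - 1 - ib.1 := by
        simp only [List.length_cons]; push_cast; ring
      rw [this]
    rw [hfun, e1, List.length_cons, pow_succ]
    ring

theorem multiplicativeHash_eq_alt (key : Int) :
    multiplicativeHash key = multiplicativeHash_alt key := by
  rw [multiplicativeHash, multiplicativeHash_alt, hashLoopA_eq_foldl,
      horner_eq_powsum (bytesOf key) 0 0]
  simp

-- ===== VERDICT (by name: the statement is the Claim_ definition above) =====
theorem multiplicativeHash_spec : Claim_equal_multiplicativeHash := by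
  intro key _
  exact multiplicativeHash_eq_alt key
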